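-- pv_equiv track=rewrite | github.com/Aryan22122/semantic-rule-matcher | app.py | get_salutation_score
-- ===== SOURCE A (Python) =====
-- salutation_patterns = [
--     {"phrases": ["Hii", "Hello"], "score": 2},
--     {"phrases": ["Good Morning", "Good Afternoon", "Good Evening", "Good Day", "Hello everyone"], "score": 4},
--     {"phrases": ["I am excited to introduce", "I am feeling great"], "score": 5}
-- ]
--
-- def get_salutation_score(text):
--     text = text.lower()
--     matches = []
--     best_score = 0
--
--     for pattern in salutation_patterns:
--         for phrase in pattern["phrases"]:
--             p = phrase.lower()
--             if p in text:
--                 best_score = max(best_score, pattern["score"])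
--                 matches.append(p)
--
--     return best_score, matches
-- ===== SOURCE B (Python) =====
-- salutation_patterns = [
--     {"phrases": ["Hii", "Hello"], "score": 2},
--     {"phrases": ["Good Morning", "Good Afternoon", "Good Evening", "Good Day", "Hello everyone"], "score": 4},
--     {"phrases": ["I am excited to introduce", "I am feeling great"], "score": 5}
-- ]
--
-- # Precomputed flat index: the nested pattern structure is flattened once at module load.
-- _PAIRS = [(phrase.lower(), pattern["score"])
--           for pattern in salutation_patterns
--           for phrase in pattern["phrases"]]
--
--
-- def _match(t, pairs):
--     # Recursion over the flat table, building the matches back-to-front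
--     # and combining the best score on the way out.
--     if not pairs:
--         return 0, []
--     phrase, score = pairs[0]
--     best, ms = _match(t, pairs[1:])
--     if phrase in t:
--         return max(score, best), [phrase] + ms
--     return best, ms
--
--
-- def get_salutation_score(text):
--     return _match(text.lower(), _PAIRS)
-- ===== Notes on version B (the rewrite author's own statement) =====
-- stated objective: alternative
-- what changed: Replaces A's nested loops over the pattern dicts with a running-max accumulator by a module-level precomputed flat (lowered phrase, score) table and a recursive helper that builds the matches back-to-front with cons and combines the best score on the way out of the recursion.
import Mathlib
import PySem

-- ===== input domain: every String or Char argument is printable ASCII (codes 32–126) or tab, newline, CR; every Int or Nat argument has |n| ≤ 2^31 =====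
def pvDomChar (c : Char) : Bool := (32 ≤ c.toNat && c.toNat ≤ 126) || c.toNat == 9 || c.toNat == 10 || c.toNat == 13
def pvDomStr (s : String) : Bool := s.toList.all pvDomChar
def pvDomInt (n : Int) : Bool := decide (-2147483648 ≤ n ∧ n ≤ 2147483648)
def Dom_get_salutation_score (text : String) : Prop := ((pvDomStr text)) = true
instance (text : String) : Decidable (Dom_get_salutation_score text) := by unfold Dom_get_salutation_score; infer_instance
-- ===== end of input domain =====

-- B replaces A's nested accumulator loops by a precomputed flat (lowered phrase, score) table
-- and a recursion building the matches back-to-front; same results, alternative decomposition.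

-- module-level constant salutation_patterns (phrases, score)
def pvPatterns : List (List String × Int) :=
  [(["Hii", "Hello"], 2),
   (["Good Morning", "Good Afternoon", "Good Evening", "Good Day", "Hello everyone"], 4),
   (["I am excited to introduce", "I am feeling great"], 5)]

-- ===== PORT A =====
def get_salutation_score (text : String) : Int × List String :=
  let t := PySem.Str.lower text
  let st :=
    pvPatterns.foldl (fun (acc : Int × List String) pat =>
      pat.1.foldl (fun (acc : Int × List String) phrase =>
        let p := PySem.Str.lower phrase
        if PySem.Str.isIn p t then (max acc.1 pat.2, acc.2 ++ [p]) else acc) acc)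
      (0, [])
  (st.1, st.2)

-- ===== PORT B =====
-- _PAIRS: module-level flat table of (lowered phrase, score)
def pvPairs : List (String × Int) :=
  pvPatterns.flatMap (fun pat => pat.1.map (fun phrase => (PySem.Str.lower phrase, pat.2)))

-- _match: recursion over the flat table, matches built back-to-front, best combined on the way out
def pvMatch (t : String) : List (String × Int) → Int × List String
  | [] => (0, [])
  | (phrase, score) :: rest =>
    let r := pvMatch t rest
    if PySem.Str.isIn phrase t then (max score r.1, phrase :: r.2) else r

def get_salutation_score_alt (text : String) : Int × List String :=
  pvMatch (PySem.Str.lower text) pvPairs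

-- ===== PRECONDITION & SPEC =====
def Spec_get_salutation_score (text : String) (out : Int × List String) : Prop := out = get_salutation_score_alt text
instance (text : String) (out : Int × List String) : Decidable (Spec_get_salutation_score text out) := by unfold Spec_get_salutation_score; infer_instance

-- ===== CLAIM (what is proved, stated in full; the proofs are below) =====
def Claim_equal_get_salutation_score : Prop := ∀ (text : String), Dom_get_salutation_score text → Spec_get_salutation_score text (get_salutation_score text)

-- ===== LEMMAS AND PROOFS =====

-- A's nested fold over patterns equals a single fold over the flattened pair table
theorem pv_flatten (t : String) (pats : List (List String × Int)) (init : Int × List String) :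
    pats.foldl (fun (acc : Int × List String) pat =>
      pat.1.foldl (fun (acc : Int × List String) phrase =>
        let p := PySem.Str.lower phrase
        if PySem.Str.isIn p t then (max acc.1 pat.2, acc.2 ++ [p]) else acc) acc) init
    = (pats.flatMap (fun pat => pat.1.map (fun phrase => (PySem.Str.lower phrase, pat.2)))).foldl
        (fun (acc : Int × List String) pr =>
          if PySem.Str.isIn pr.1 t then (max acc.1 pr.2, acc.2 ++ [pr.1]) else acc) init := by
  induction pats generalizing init with
  | nil => simp
  | cons pat rest ih =>
    simp only [List.flatMap_cons, List.foldl_cons, List.foldl_append, List.foldl_map, ih]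

-- the flat left fold with accumulator (b, ms), 0 ≤ b, equals B's back-to-front recursion
theorem pv_fold_eq_match (t : String) (pairs : List (String × Int)) (b : Int) (ms : List String)
    (hb : 0 ≤ b) :
    pairs.foldl (fun (acc : Int × List String) pr =>
        if PySem.Str.isIn pr.1 t then (max acc.1 pr.2, acc.2 ++ [pr.1]) else acc) (b, ms)
    = (max b (pvMatch t pairs).1, ms ++ (pvMatch t pairs).2) := by
  induction pairs generalizing b ms with
  | nil => simp [pvMatch, max_eq_left hb]
  | cons pr rest ih =>
    obtain ⟨p, s⟩ := pr
    simp only [List.foldl_cons, pvMatch]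
    by_cases h : PySem.Str.isIn p t = true
    · rw [if_pos h, if_pos h, ih _ _ (le_trans hb (le_max_left b s))]
      simp [max_assoc, List.append_assoc]
    · rw [if_neg h, if_neg h, ih _ _ hb]

theorem pv_match_nonneg (t : String) (pairs : List (String × Int)) : 0 ≤ (pvMatch t pairs).1 := by
  induction pairs with
  | nil => simp [pvMatch]
  | cons pr rest ih =>
    obtain ⟨p, s⟩ := pr
    simp only [pvMatch]
    split
    · exact le_trans ih (le_max_right s _)
    · exact ih

-- ===== VERDICT (by name: the statement is the Claim_ definition above) =====
theorem get_salutation_score_spec : Claim_equal_get_salutation_score := by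
  intro text _
  unfold Spec_get_salutation_score get_salutation_score get_salutation_score_alt pvPairs
  simp only [pv_flatten, pv_fold_eq_match _ _ 0 [] le_rfl, List.nil_append,
    max_eq_right (pv_match_nonneg _ _)]
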